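-- pv_equiv track=rewrite | github.com/karamdali/PRB_python_homework | unit.py | hightestMonth
-- ===== SOURCE A (Python) =====
-- def hightestMonth(data):
--     totalSales={}
--                                             #looping throug the data dict
--     for month, products in data.items() :
--         sum = 0                             #variable to store the sum of products total sales in one month
--         for product in products:            #looping through product names and total selling prices
--             sum = sum + product[1]
--         totalSales[month] = sum             #store the total sales in each month in totalSales dict
--     month = list(totalSales.keys())         #pull the keys of totalSales dictionary and convert them to a list and save it into month variable
--     sumOfSales = list(totalSales.values())  #pull the values of totalSales dictionary and convert them to a list and save it into sumOfSales variable
--     return month[sumOfSales.index(max(sumOfSales))] #the month with the hights sales based on the index of the max value of sumOfSales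
-- ===== SOURCE B (Python) =====
-- def hightestMonth(data):
--     # Stable-sort the months by negated total sales and take the first:
--     # ties keep dict insertion order, matching A's first-max behaviour.
--     return sorted(data.items(), key=lambda kv: -sum(p[1] for p in kv[1]))[0][0]
-- ===== Notes on version B (the rewrite author's own statement) =====
-- stated objective: alternative
-- what changed: Replaces A's build-totals-dict then parallel keys/values lists with .index(max(...)) by a sort-based algorithm: stable-sort the months by negated total sales and return the first month; stability makes ties keep insertion order exactly as A's first-max scan does.
-- outside the precondition, e.g. on hightestMonth({}): A raises ValueError, B raises IndexError
import Mathlib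
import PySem

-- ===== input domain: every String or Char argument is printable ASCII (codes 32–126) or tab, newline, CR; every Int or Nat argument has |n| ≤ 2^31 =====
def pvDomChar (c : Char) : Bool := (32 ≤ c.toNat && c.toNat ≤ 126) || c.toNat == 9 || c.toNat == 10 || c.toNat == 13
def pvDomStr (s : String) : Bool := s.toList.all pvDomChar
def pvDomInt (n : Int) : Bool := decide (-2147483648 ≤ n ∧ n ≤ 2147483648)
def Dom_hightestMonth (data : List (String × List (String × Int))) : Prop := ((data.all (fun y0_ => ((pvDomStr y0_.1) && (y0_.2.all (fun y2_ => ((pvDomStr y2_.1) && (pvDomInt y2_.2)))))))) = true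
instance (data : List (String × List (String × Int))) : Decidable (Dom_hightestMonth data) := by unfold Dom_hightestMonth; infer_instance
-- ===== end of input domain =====

-- B replaces A's build-totals-dict + parallel keys/values + .index(max(...)) scan by a
-- stable sort on negated monthly totals, returning the first month; same result, different algorithm.


-- ===== PORT A =====
def hightestMonth (data : List (String × List (String × Int))) : String :=
  -- totalSales = {}; for month, products in data.items(): sum = 0; for product in products: sum += product[1]; totalSales[month] = sum
  let totalSales : PySem.Dict String Int :=
    data.foldl (fun d mp => d.insert mp.1 (mp.2.foldl (fun s product => s + product.2) 0))
      PySem.Dict.empty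
  let month := totalSales.keys
  let sumOfSales := totalSales.values
  -- return month[sumOfSales.index(max(sumOfSales))]; max([]) raises ValueError (excluded by Pre_)
  match PySem.List.max? sumOfSales (fun v => v) with
  | none => ""
  | some mx =>
    match PySem.List.index? sumOfSales mx with
    | none => ""
    | some i => (PySem.List.pyGet? month (i : Int)).getD ""

-- ===== PORT B =====
def hightestMonth_alt (data : List (String × List (String × Int))) : String :=
  -- return sorted(data.items(), key=lambda kv: -sum(p[1] for p in kv[1]))[0][0]
  -- (data is a dict; its items list IS the association list); [0] raises IndexError on empty (excluded by Pre_)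
  let s := PySem.List.sorted data (fun kv => -((kv.2.map (fun p => p.2)).sum)) false
  match PySem.List.pyGet? s (0 : Int) with
  | some kv => kv.1
  | none => ""

-- ===== PRECONDITION & SPEC =====
-- Pre_ excludes (a) the empty dict, on which both Pythons raise (A: ValueError from max([]),
-- B: IndexError from [0]), and (b) association lists with duplicate month keys, which do not
-- represent any Python dict argument (a dict cannot contain a key twice).
def Pre_hightestMonth (data : List (String × List (String × Int))) : Prop :=
  data ≠ [] ∧ (data.map Prod.fst).Nodup
instance (data : List (String × List (String × Int))) : Decidable (Pre_hightestMonth data) := by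
  unfold Pre_hightestMonth; infer_instance
def pvWitness_hightestMonth : (List (String × List (String × Int))) :=
  [("jan", [("x", 3), ("y", 1)]), ("feb", [("z", 4)])]
def Spec_hightestMonth (data : List (String × List (String × Int))) (out : String) : Prop := out = hightestMonth_alt data
instance (data : List (String × List (String × Int))) (out : String) : Decidable (Spec_hightestMonth data out) := by unfold Spec_hightestMonth; infer_instance

-- ===== CLAIM (what is proved, stated in full; the proofs are below) =====
def Claim_equal_hightestMonth : Prop := ∀ (data : List (String × List (String × Int))), Dom_hightestMonth data → Pre_hightestMonth data → Spec_hightestMonth data (hightestMonth data)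

-- ===== LEMMAS AND PROOFS =====

-- the running-max fold used by PySem.List.max?
def pvStep {α : Type} (g : α → Int) (acc : Option α) (x : α) : Option α :=
  match acc with
  | none => some x
  | some m => if g m < g x then some x else some m

-- the same fold on plain values (first maximum wins)
def pvVStep {α : Type} (g : α → Int) (m : α) (x : α) : α := if g m < g x then x else m

theorem max?_eq_foldl {α : Type} (g : α → Int) (L : List α) :
    PySem.List.max? L g = L.foldl (pvStep g) none := rfl

theorem foldl_pvStep_some {α : Type} (g : α → Int) (L : List α) :
    ∀ m : α, L.foldl (pvStep g) (some m) = some (L.foldl (pvVStep g) m) := by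
  induction L with
  | nil => intro m; rfl
  | cons a t ih =>
    intro m
    simp only [List.foldl_cons, pvStep, pvVStep]
    split_ifs <;> exact ih _

-- max? over a mapped list is the mapped max?
theorem foldl_step_map {α β : Type} (h : α → β) (k : β → Int) (L : List α) :
    ∀ acc : Option α,
      (L.map h).foldl (pvStep k) (acc.map h) = (L.foldl (pvStep (fun a => k (h a))) acc).map h := by
  induction L with
  | nil => intro acc; rfl
  | cons a t ih =>
    intro acc
    have : pvStep k (acc.map h) (h a) = (pvStep (fun a => k (h a)) acc a).map h := by
      cases acc with
      | none => rfl
      | some m => simp only [pvStep, Option.map_some]; split_ifs <;> rfl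
    simpa [this] using ih (pvStep (fun a => k (h a)) acc a)

-- the fold keeps the FIRST element attaining the maximum
theorem foldl_argmax {α : Type} (g : α → Int) (L : List α) :
    ∀ m : α, ∃ p, L.foldl (pvStep g) (some m) = some p ∧
      ((p = m ∧ ∀ y ∈ L, g y ≤ g m) ∨
       (∃ i : ℕ, L[i]? = some p ∧ g m < g p ∧
          (∀ j < i, ∀ y, L[j]? = some y → g y < g p) ∧ (∀ y ∈ L, g y ≤ g p))) := by
  induction L with
  | nil => intro m; exact ⟨m, rfl, Or.inl ⟨rfl, by simp⟩⟩
  | cons a t ih =>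
    intro m
    by_cases hlt : g m < g a
    · obtain ⟨p, hfold, hcase⟩ := ih a
      refine ⟨p, by simpa [pvStep, hlt] using hfold, Or.inr ?_⟩
      rcases hcase with ⟨rfl, hall⟩ | ⟨i, hi, hgt, hbef, hall⟩
      · exact ⟨0, by simp, hlt, by omega, by
          intro y hy; rcases List.mem_cons.mp hy with rfl | hy
          · exact le_refl _
          · exact hall y hy⟩
      · refine ⟨i + 1, by simpa using hi, lt_trans hlt hgt, ?_, ?_⟩
        · intro j hj y hy
          cases j with
          | zero => simp at hy; subst hy; exact hgt
          | succ j' => exact hbef j' (by omega) y (by simpa using hy)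
        · intro y hy; rcases List.mem_cons.mp hy with rfl | hy
          · exact le_of_lt hgt
          · exact hall y hy
    · obtain ⟨p, hfold, hcase⟩ := ih m
      refine ⟨p, by simpa [pvStep, hlt] using hfold, ?_⟩
      rcases hcase with ⟨rfl, hall⟩ | ⟨i, hi, hgt, hbef, hall⟩
      · exact Or.inl ⟨rfl, by
          intro y hy; rcases List.mem_cons.mp hy with rfl | hy
          · omega
          · exact hall y hy⟩
      · refine Or.inr ⟨i + 1, by simpa using hi, hgt, ?_, ?_⟩
        · intro j hj y hy
          cases j with
          | zero => simp at hy; subst hy; omega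
          | succ j' => exact hbef j' (by omega) y (by simpa using hy)
        · intro y hy; rcases List.mem_cons.mp hy with rfl | hy
          · omega
          · exact hall y hy

theorem max?_first_argmax {α : Type} (g : α → Int) (x : α) (t : List α) :
    ∃ (p : α) (i : ℕ), PySem.List.max? (x :: t) g = some p ∧ i < (x :: t).length ∧
      (x :: t)[i]? = some p ∧
      (∀ j < i, ∀ y, (x :: t)[j]? = some y → g y < g p) ∧
      (∀ y ∈ x :: t, g y ≤ g p) := by
  obtain ⟨p, hfold, hcase⟩ := foldl_argmax g t x
  have hmax : PySem.List.max? (x :: t) g = some p := by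
    rw [max?_eq_foldl]; simpa [pvStep] using hfold
  rcases hcase with ⟨rfl, hall⟩ | ⟨i, hi, hgt, hbef, hall⟩
  · refine ⟨p, 0, hmax, by simp, by simp, by omega, ?_⟩
    intro y hy; rcases List.mem_cons.mp hy with rfl | hy
    · exact le_refl _
    · exact hall y hy
  · have hilen : i < t.length := by
      by_contra hge
      rw [List.getElem?_eq_none (by omega)] at hi
      simp at hi
    refine ⟨p, i + 1, hmax, by simpa using (by omega : i + 1 < t.length + 1), by simpa using hi, ?_, ?_⟩
    · intro j hj y hy
      cases j with
      | zero => simp at hy; subst hy; exact hgt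
      | succ j' => exact hbef j' (by omega) y (by simpa using hy)
    · intro y hy; rcases List.mem_cons.mp hy with rfl | hy
      · exact le_of_lt hgt
      · exact hall y hy

theorem foldl_add_eq_sum (l : List (String × Int)) :
    ∀ c : Int, l.foldl (fun s product => s + product.2) c = c + (l.map (fun p => p.2)).sum := by
  induction l with
  | nil => intro c; simp
  | cons a t ih => intro c; simp [ih]; ring

-- head of the insertion-sort fold: a nonempty accumulator stays nonempty and its head
-- evolves by the "first strict improvement wins" value fold
theorem head_foldl_insertBy {α : Type} (before : α → α → Bool) (L : List α) :
    ∀ (h : α) (t : List α),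
      ∃ t', L.foldl (fun acc x => PySem.List.insertBy before x acc) (h :: t)
        = (L.foldl (fun m x => if before x m then x else m) h) :: t' := by
  induction L with
  | nil => intro h t; exact ⟨t, rfl⟩
  | cons a L ih =>
    intro h t
    simp only [List.foldl_cons, PySem.List.insertBy]
    by_cases hb : before a h
    · simpa [hb] using ih a (h :: t)
    · simpa [hb] using ih h (PySem.List.insertBy before a t)

-- head of the stable sort of a nonempty list is the first maximum of g (key = -g)
theorem sorted_neg_head {α : Type} (g : α → Int) (x : α) (t : List α) :
    ∃ t', PySem.List.sorted (x :: t) (fun kv => -(g kv)) false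
      = (t.foldl (pvVStep g) x) :: t' := by
  rw [PySem.List.sorted_eq_foldl_insertBy]
  simp only [List.foldl_cons, PySem.List.insertBy]
  obtain ⟨t', ht'⟩ := head_foldl_insertBy (fun a b => decide (-(g a) < -(g b))) t x ([] : List α)
  refine ⟨t', ?_⟩
  rw [ht']
  congr 1
  have hfun : (fun (m x : α) => if (decide (-(g x) < -(g m)) : Bool) then x else m)
      = pvVStep g := by
    funext m x
    by_cases h : g m < g x <;> simp [pvVStep, h, neg_lt_neg_iff]
  rw [hfun]

-- ===== VERDICT (by name: the statement is the Claim_ definition above) =====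
theorem hightestMonth_spec : Claim_equal_hightestMonth := by
  intro data _ hpre
  obtain ⟨hne, hnodup⟩ := hpre
  unfold Spec_hightestMonth hightestMonth hightestMonth_alt
  set g : (String × List (String × Int)) → Int := fun mp => (mp.2.map (fun p => p.2)).sum with hg
  -- A's totalSales dict has items data.map (fun mp => (mp.1, g mp))
  have hitems :
      (data.foldl (fun d mp => d.insert mp.1 (mp.2.foldl (fun s product => s + product.2) 0))
        (PySem.Dict.empty : PySem.Dict String Int)).items
        = data.map (fun mp => (mp.1, g mp)) := by
    have h := PySem.Dict.items_foldl_insert_fresh data (fun mp => mp.1)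
      (fun mp => mp.2.foldl (fun s product => s + product.2) 0)
      (PySem.Dict.empty : PySem.Dict String Int)
      (fun a _ => PySem.Dict.contains_empty _) hnodup
    rw [h]
    have : ∀ mp : String × List (String × Int),
        mp.2.foldl (fun s product => s + product.2) 0 = g mp := by
      intro mp; rw [foldl_add_eq_sum]; simp [hg]
    simp only [PySem.Dict.empty]
    simp [this]
  have hkeys :
      (data.foldl (fun d mp => d.insert mp.1 (mp.2.foldl (fun s product => s + product.2) 0))
        (PySem.Dict.empty : PySem.Dict String Int)).keys = data.map Prod.fst := by
    simp only [PySem.Dict.keys, hitems]; simp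
  have hvals :
      (data.foldl (fun d mp => d.insert mp.1 (mp.2.foldl (fun s product => s + product.2) 0))
        (PySem.Dict.empty : PySem.Dict String Int)).values = data.map g := by
    simp only [PySem.Dict.values, hitems]; simp
  obtain ⟨x, t, rfl⟩ := List.exists_cons_of_ne_nil hne
  obtain ⟨p, i, hmax, hilen, hget, hbef, hall⟩ := max?_first_argmax g x t
  -- A side: max of the values list is g p, its first index is i
  have hmaxv : PySem.List.max? ((x :: t).map g) (fun v => v) = some (g p) := by
    rw [max?_eq_foldl]
    have hm := foldl_step_map g (fun v => v) (x :: t) (none : Option (String × List (String × Int)))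
    simp only [Option.map_none] at hm
    rw [hm]
    have hmm : (x :: t).foldl (pvStep (fun a => g a)) none = some p := by
      rw [← max?_eq_foldl]; exact hmax
    rw [hmm]; rfl
  have hidx : PySem.List.index? ((x :: t).map g) (g p) = some i := by
    simp only [PySem.List.index?]
    rw [List.idxOf?_eq_some_iff]
    rw [List.getElem?_eq_some_iff] at hget
    obtain ⟨h1, h2⟩ := hget
    refine ⟨by simpa using hilen, by rw [List.getElem_map, h2], ?_⟩
    intro j hj
    have hjlen : j < (x :: t).length := by omega
    have hlt : g ((x :: t)[j]) < g p :=
      hbef j hj _ (List.getElem?_eq_some_iff.mpr ⟨hjlen, rfl⟩)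
    rw [List.getElem_map]
    omega
  have hget' : (x :: t)[i]? = some p := hget
  -- B side: the head of the sorted list is p
  have hpfold : t.foldl (pvVStep g) x = p := by
    have := foldl_pvStep_some g t x
    rw [max?_eq_foldl] at hmax
    simp only [List.foldl_cons, pvStep] at hmax
    rw [this] at hmax
    exact Option.some_injective _ hmax
  obtain ⟨t', hsorted⟩ := sorted_neg_head g x t
  rw [hpfold] at hsorted
  -- assemble
  have hfst : ((x :: t).map Prod.fst)[i]? = some p.1 := by
    rw [List.getElem?_eq_some_iff] at hget' ⊢
    obtain ⟨h1, h2⟩ := hget'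
    exact ⟨by simpa using h1, by rw [List.getElem_map, h2]⟩
  have h0 : PySem.List.pyGet? (p :: t') (0 : Int) = some p := by
    simp [PySem.List.pyGet?, PySem.List.pyIdx?]
  simp only [hg] at hsorted
  simp only [hkeys, hvals, hmaxv, hidx, hsorted, h0]
  rw [PySem.List.pyGet?_natCast, hfst]
  rfl
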